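-- pv_equiv track=rewrite | github.com/freddiefreeloader1/Imitation-Learning-for-Driving-Control | src/preprocessing/split_helper.py | has_decreasing_segment
-- ===== SOURCE A (Python) =====
-- def has_decreasing_segment(segment_S, min_decreasing_steps):
--
--     decreasing_count = 0
--
--     for i in range(1, len(segment_S)):
--         if segment_S[i] < segment_S[i - 1]:
--             decreasing_count += 1
--             if decreasing_count >= min_decreasing_steps:
--                 return True
--         else:
--             decreasing_count = 0
--
--     return False
-- ===== SOURCE B (Python) =====
-- def has_decreasing_segment(segment_S, min_decreasing_steps):
--     # groupby-style: adjacent comparison list, then scan maximal equal runs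
--     decr = [b < a for a, b in zip(segment_S, segment_S[1:])]
--     n = len(decr)
--     i = 0
--     while i < n:
--         key = decr[i]
--         run = 1
--         while i + run < n and decr[i + run] == key:
--             run += 1
--         if key and run >= min_decreasing_steps:
--             return True
--         i += run
--     return False
-- ===== Notes on version B (the rewrite author's own statement) =====
-- stated objective: alternative
-- what changed: A's stateful counter with early return inside one index loop is replaced by first materialising the adjacent-comparison list and then scanning its maximal equal runs (groupby-style), testing each True-run's length against the threshold.
import Mathlib
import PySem

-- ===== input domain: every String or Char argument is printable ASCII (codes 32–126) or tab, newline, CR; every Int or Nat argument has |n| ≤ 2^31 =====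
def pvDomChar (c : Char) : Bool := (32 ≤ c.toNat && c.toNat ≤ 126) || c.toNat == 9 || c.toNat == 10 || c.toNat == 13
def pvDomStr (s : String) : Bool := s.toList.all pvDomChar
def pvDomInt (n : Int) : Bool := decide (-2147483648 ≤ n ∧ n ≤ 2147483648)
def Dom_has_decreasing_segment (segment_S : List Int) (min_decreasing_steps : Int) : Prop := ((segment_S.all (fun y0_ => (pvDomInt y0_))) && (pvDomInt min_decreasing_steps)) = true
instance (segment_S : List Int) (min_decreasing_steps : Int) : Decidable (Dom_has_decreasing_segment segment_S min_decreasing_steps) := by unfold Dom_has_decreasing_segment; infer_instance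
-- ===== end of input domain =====

-- B replaces A's stateful counter loop by building the adjacent-comparison list and
-- scanning its maximal runs (groupby-style); objective: alternative decomposition, same cost.

-- ===== PORT A =====
-- the indices produced by range(1, len) are always in bounds, so pyGetD's default is never used
def aLoop (s : List Int) (mn : Int) : List Int → Int → Bool
  | [], _ => false
  | i :: rest, cnt =>
    if PySem.List.pyGetD s i 0 < PySem.List.pyGetD s (i - 1) 0 then
      if cnt + 1 ≥ mn then true
      else aLoop s mn rest (cnt + 1)
    else aLoop s mn rest 0

def has_decreasing_segment (segment_S : List Int) (min_decreasing_steps : Int) : Bool :=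
  aLoop segment_S min_decreasing_steps (PySem.List.pyRange 1 segment_S.length 1) 0

-- ===== PORT B =====
-- scan of decr from cursor i, rendered as the suffix list: key = head, run = 1 + length of the
-- equal prefix of the tail (inner while), and advancing i by run = dropWhile on the tail
def bScan (mn : Int) : List Bool → Bool
  | [] => false
  | key :: rest =>
    if key && decide ((1 + ((rest.takeWhile (· == key)).length : Int)) ≥ mn) then true
    else bScan mn (rest.dropWhile (· == key))
termination_by l => l.length
decreasing_by
  simp only [List.length_cons]
  exact Nat.lt_succ_of_le (List.length_dropWhile_le _ _)

def has_decreasing_segment_alt (segment_S : List Int) (min_decreasing_steps : Int) : Bool :=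
  let decr := (segment_S.zip (PySem.List.slice segment_S (some 1) none)).map
      (fun p => decide (p.2 < p.1))
  bScan min_decreasing_steps decr

-- ===== PRECONDITION & SPEC =====
def Spec_has_decreasing_segment (segment_S : List Int) (min_decreasing_steps : Int) (out : Bool) : Prop := out = has_decreasing_segment_alt segment_S min_decreasing_steps
instance (segment_S : List Int) (min_decreasing_steps : Int) (out : Bool) : Decidable (Spec_has_decreasing_segment segment_S min_decreasing_steps out) := by unfold Spec_has_decreasing_segment; infer_instance

-- ===== CLAIM (what is proved, stated in full; the proofs are below) =====
def Claim_equal_has_decreasing_segment : Prop := ∀ (segment_S : List Int) (min_decreasing_steps : Int), Dom_has_decreasing_segment segment_S min_decreasing_steps → Spec_has_decreasing_segment segment_S min_decreasing_steps (has_decreasing_segment segment_S min_decreasing_steps)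

-- ===== LEMMAS AND PROOFS =====

-- the list of adjacent comparisons, as a structural recursion
def decrList : List Int → List Bool
  | x :: y :: t => decide (y < x) :: decrList (y :: t)
  | _ => []

-- a canonical middle form: A's counter loop on the comparison list
def aRec (mn : Int) : List Bool → Int → Bool
  | [], _ => false
  | b :: rest, cnt =>
    if b then (if cnt + 1 ≥ mn then true else aRec mn rest (cnt + 1))
    else aRec mn rest 0

lemma decrOf_eq (s : List Int) :
    (s.zip (PySem.List.slice s (some 1) none)).map (fun p => decide (p.2 < p.1)) = decrList s := by
  rw [PySem.List.slice_from_one]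
  induction s with
  | nil => rfl
  | cons x t ih =>
    cases t with
    | nil => rfl
    | cons y u =>
      simp only [List.tail_cons, List.zip_cons_cons, List.map_cons, decrList]
      exact congrArg _ (by simpa using ih)

lemma L1 (s : List Int) (mn : Int) :
    ∀ (fuel j : Nat) (cnt : Int), s.length ≤ j + 1 + fuel →
      aLoop s mn (PySem.List.pyRange ((j : Int) + 1) s.length 1) cnt
        = aRec mn (decrList (s.drop j)) cnt := by
  intro fuel
  induction fuel with
  | zero =>
    intro j cnt hlen
    have hr : PySem.List.pyRange ((j : Int) + 1) s.length 1 = [] := by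
      rw [PySem.List.pyRange_one]
      have : ((s.length : Int) - ((j : Int) + 1)).toNat = 0 := by omega
      simp [this]
    rw [hr]
    have : decrList (s.drop j) = [] := by
      rcases h : s.drop j with _ | ⟨x, _ | ⟨y, t⟩⟩
      · rfl
      · rfl
      · have := List.length_drop (l := s) (i := j)
        rw [h] at this; simp at this; omega
    rw [this]; rfl
  | succ fuel ih =>
    intro j cnt hlen
    by_cases h : j + 1 < s.length
    · have hj1 : ((j : Int) + 1) < (s.length : Int) := by exact_mod_cast h
      rw [PySem.List.pyRange_one_cons hj1]
      have hget1 : PySem.List.pyGetD s ((j : Int) + 1) 0 = s[j + 1] := by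
        have : ((j : Int) + 1) = ((j + 1 : Nat) : Int) := by push_cast; ring
        rw [this, PySem.List.pyGetD_natCast, List.getD_eq_getElem?_getD,
            List.getElem?_eq_getElem h]; rfl
      have hget0 : PySem.List.pyGetD s ((j : Int) + 1 - 1) 0 = s[j] := by
        have : ((j : Int) + 1 - 1) = ((j : Nat) : Int) := by ring
        rw [this, PySem.List.pyGetD_natCast, List.getD_eq_getElem?_getD,
            List.getElem?_eq_getElem (by omega : j < s.length)]; rfl
      have hdrop : s.drop j = s[j] :: s[j + 1] :: s.drop (j + 2) := by
        rw [List.drop_eq_getElem_cons (by omega : j < s.length),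
            List.drop_eq_getElem_cons h]
      have hdrop1 : s.drop (j + 1) = s[j + 1] :: s.drop (j + 2) :=
        List.drop_eq_getElem_cons h
      have hrec : ∀ c : Int,
          aLoop s mn (PySem.List.pyRange ((j : Int) + 1 + 1) s.length 1) c
            = aRec mn (decrList (s.drop (j + 1))) c := by
        intro c
        have : ((j : Int) + 1 + 1) = (((j + 1 : Nat) : Int) + 1) := by push_cast; ring
        rw [this]
        exact ih (j + 1) c (by omega)
      rw [hdrop]
      simp only [aLoop, aRec, decrList, hget1, hget0, ← hdrop1, hrec]
      by_cases hc : s[j + 1] < s[j] <;> simp [hc]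
    · have hr : PySem.List.pyRange ((j : Int) + 1) s.length 1 = [] := by
        rw [PySem.List.pyRange_one]
        have : ((s.length : Int) - ((j : Int) + 1)).toNat = 0 := by omega
        simp [this]
      rw [hr]
      have : decrList (s.drop j) = [] := by
        rcases hd : s.drop j with _ | ⟨x, _ | ⟨y, t⟩⟩
        · rfl
        · rfl
        · have := List.length_drop (l := s) (i := j)
          rw [hd] at this; simp at this; omega
      rw [this]; rfl

-- aRec ignores the incoming counter when the next element is not a decrease (or gone)
lemma aRec_reset (mn : Int) (d : List Bool) (hd : d = [] ∨ d.head? = some false) :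
    ∀ c : Int, aRec mn d c = aRec mn d 0 := by
  intro c
  rcases hd with h | h
  · subst h; rfl
  · cases d with
    | nil => rfl
    | cons b rest =>
      simp only [List.head?_cons, Option.some.injEq] at h
      subst h; rfl

-- skipping a block of false comparisons
lemma aRec_false_block (mn : Int) :
    ∀ (t d : List Bool), (∀ x ∈ t, x = false) →
      aRec mn (t ++ d) 0 = aRec mn d 0 := by
  intro t
  induction t with
  | nil => intro d _; rfl
  | cons b t' ih =>
    intro d h
    have hb : b = false := h b (by simp)
    subst hb
    simpa [aRec] using ih d (fun x hx => h x (by simp [hx]))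

-- running through a block of true comparisons
lemma aRec_true_block (mn : Int) :
    ∀ (t d : List Bool) (cnt : Int), (∀ x ∈ t, x = true) →
      aRec mn (t ++ d) cnt
        = (if mn ≤ cnt + (t.length : Int) ∧ 1 ≤ (t.length : Int) then true
           else aRec mn d (cnt + (t.length : Int))) := by
  intro t
  induction t with
  | nil =>
    intro d cnt _
    simp
  | cons b t' ih =>
    intro d cnt h
    have hb : b = true := h b (by simp)
    subst hb
    have ih' := ih d (cnt + 1) (fun x hx => h x (by simp [hx]))
    simp only [List.cons_append, aRec, if_true, ih', List.length_cons]
    push_cast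
    by_cases h1 : cnt + 1 ≥ mn
    · have ht : mn ≤ cnt + ((t'.length : Int) + 1) ∧ (1 : Int) ≤ (t'.length : Int) + 1 := by
        constructor <;> omega
      simp [h1, ht]
    · rw [if_neg h1]
      by_cases h2 : mn ≤ cnt + 1 + (t'.length : Int)
      · rw [if_pos ⟨h2, by omega⟩, if_pos ⟨by omega, by omega⟩]
      · rw [if_neg (by omega), if_neg (by omega)]
        congr 1
        ring

lemma bScan_cons (mn : Int) (key : Bool) (rest : List Bool) :
    bScan mn (key :: rest)
      = if key && decide ((1 + ((rest.takeWhile (· == key)).length : Int)) ≥ mn) then true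
        else bScan mn (rest.dropWhile (· == key)) := by
  rw [bScan.eq_def]

lemma L2 (mn : Int) : ∀ (n : Nat) (l : List Bool), l.length ≤ n → aRec mn l 0 = bScan mn l := by
  intro n
  induction n with
  | zero =>
    intro l hl
    have : l = [] := List.eq_nil_of_length_eq_zero (by omega)
    subst this
    simp [aRec, bScan]
  | succ n ih =>
    intro l hl
    cases l with
    | nil => simp [aRec, bScan]
    | cons key rest =>
      have hsplit : key :: rest
          = (key :: rest.takeWhile (· == key)) ++ rest.dropWhile (· == key) := by
        simp [List.takeWhile_append_dropWhile]
      have hlen : (rest.dropWhile (· == key)).length ≤ n := by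
        have := List.length_dropWhile_le (· == key) rest
        simp only [List.length_cons] at hl
        omega
      have hdw : rest.dropWhile (· == key) = [] ∨
          (rest.dropWhile (· == key)).head? = some (!key) := by
        rcases hd : rest.dropWhile (· == key) with _ | ⟨b, d'⟩
        · exact Or.inl rfl
        · right
          have hhd := List.head_dropWhile_not (p := (· == key)) (l := rest) (by simp [hd])
          simp only [hd, List.head_cons] at hhd

          simp only [List.head?_cons, Option.some.injEq]
          cases key <;> cases b <;> first | rfl | exact absurd hhd (by decide)
      cases hkey : key
      · -- key = false: A resets through the false block
        subst hkey
        conv_lhs => rw [hsplit]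
        have hblk : aRec mn ((false :: rest.takeWhile (· == false)) ++ rest.dropWhile (· == false)) 0
            = aRec mn (rest.dropWhile (· == false)) 0 := by
          apply aRec_false_block
          intro x hx
          rcases List.mem_cons.mp hx with h | h
          · exact h
          · simpa using List.mem_takeWhile_imp h
        rw [hblk, ih _ hlen, bScan_cons]
        simp
      · -- key = true: A counts through the true block
        subst hkey
        have hall : ∀ x ∈ (true :: rest.takeWhile (· == true)), x = true := by
          intro x hx
          rcases List.mem_cons.mp hx with h | h
          · exact h
          · simpa using List.mem_takeWhile_imp h
        conv_lhs => rw [hsplit]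
        rw [aRec_true_block mn _ _ 0 hall, bScan_cons]
        simp only [List.length_cons, Bool.true_and, decide_eq_true_eq]
        by_cases hge : (1 : Int) + ((rest.takeWhile (· == true)).length : Int) ≥ mn
        · rw [if_pos (by constructor <;> push_cast <;> omega), if_pos hge]
        · rw [if_neg (by push_cast; omega), if_neg hge,
              aRec_reset mn _ hdw, ih _ hlen]

-- ===== VERDICT (by name: the statement is the Claim_ definition above) =====
theorem has_decreasing_segment_spec : Claim_equal_has_decreasing_segment := by
  intro s mn _
  unfold Spec_has_decreasing_segment has_decreasing_segment has_decreasing_segment_alt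
  rw [decrOf_eq, ← L2 mn (decrList s).length _ le_rfl]
  have h1 := L1 s mn s.length 0 0 (by omega)
  norm_num at h1
  rw [h1]
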